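-- pv_equiv track=rewrite | github.com/GiantFurosemide/MD_dataprocess | fasta2SEQRES.py | format_seqres_record
-- ===== SOURCE A (Python) =====
-- def format_seqres_record(chain_id, sequence, residue_count):
--     seqres_records = []
--     seqres_template = "SEQRES {serial:3d} {chain_id} {residue_count:-5d} {residues}"
--
--     serial = 1
--     residues = []  # Initialize residues list
--
--     for residue in sequence:
--         # Convert one-letter code to three-letter code
--         three_letter_code = one_to_three_letter_code(residue)
--
--         if len(residues) == 13:
--             # Output SEQRES record and reset counters
--             seqres_records.append(seqres_template.format(serial=serial, chain_id=chain_id, residue_count=residue_count, residues=" ".join(residues)))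
--             serial += 1
--             residues = []
--
--         residues.append(three_letter_code)
--
--     # Output the last SEQRES record
--     if residues:
--         seqres_records.append(seqres_template.format(serial=serial, chain_id=chain_id, residue_count=residue_count, residues=" ".join(residues)))
--
--     return seqres_records
--
-- def one_to_three_letter_code(one_letter_code):
--     # Define a dictionary for one to three letter code mapping
--     aa_mapping = {
--         'A': 'ALA', 'R': 'ARG', 'N': 'ASN', 'D': 'ASP', 'C': 'CYS', 'E': 'GLU',
--         'Q': 'GLN', 'G': 'GLY', 'H': 'HIS', 'I': 'ILE', 'L': 'LEU', 'K': 'LYS',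
--         'M': 'MET', 'F': 'PHE', 'P': 'PRO', 'S': 'SER', 'T': 'THR', 'W': 'TRP',
--         'Y': 'TYR', 'V': 'VAL'
--     }
--
--     return aa_mapping.get(one_letter_code, 'XXX')  # Default to 'XXX' if not found
-- ===== SOURCE B (Python) =====
-- AA_MAPPING = {
--     'A': 'ALA', 'R': 'ARG', 'N': 'ASN', 'D': 'ASP', 'C': 'CYS', 'E': 'GLU',
--     'Q': 'GLN', 'G': 'GLY', 'H': 'HIS', 'I': 'ILE', 'L': 'LEU', 'K': 'LYS',
--     'M': 'MET', 'F': 'PHE', 'P': 'PRO', 'S': 'SER', 'T': 'THR', 'W': 'TRP',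
--     'Y': 'TYR', 'V': 'VAL'
-- }
--
-- SEQRES_TEMPLATE = "SEQRES {serial:3d} {chain_id} {residue_count:-5d} {residues}"
--
--
-- def format_seqres_record(chain_id, sequence, residue_count):
--     # Phase 1: translate the whole sequence to three-letter codes.
--     codes = [AA_MAPPING.get(c, 'XXX') for c in sequence]
--     # Phase 2: one record per 13-code window of `codes`.
--     records = []
--     serial = 1
--     start = 0
--     while start < len(codes):
--         records.append(SEQRES_TEMPLATE.format(
--             serial=serial, chain_id=chain_id, residue_count=residue_count,
--             residues=" ".join(codes[start:start + 13])))
--         start += 13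
--         serial += 1
--     return records
-- ===== Notes on version B (the rewrite author's own statement) =====
-- stated objective: simpler
-- what changed: Replaces A's single interleaved loop (accumulate residues, flush at 13 inside the loop, extra post-loop flush) with a two-phase decomposition: map the whole sequence to three-letter codes first, then emit one record per 13-code window codes[start:start+13], so the trailing-record special case disappears.
import Mathlib
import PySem

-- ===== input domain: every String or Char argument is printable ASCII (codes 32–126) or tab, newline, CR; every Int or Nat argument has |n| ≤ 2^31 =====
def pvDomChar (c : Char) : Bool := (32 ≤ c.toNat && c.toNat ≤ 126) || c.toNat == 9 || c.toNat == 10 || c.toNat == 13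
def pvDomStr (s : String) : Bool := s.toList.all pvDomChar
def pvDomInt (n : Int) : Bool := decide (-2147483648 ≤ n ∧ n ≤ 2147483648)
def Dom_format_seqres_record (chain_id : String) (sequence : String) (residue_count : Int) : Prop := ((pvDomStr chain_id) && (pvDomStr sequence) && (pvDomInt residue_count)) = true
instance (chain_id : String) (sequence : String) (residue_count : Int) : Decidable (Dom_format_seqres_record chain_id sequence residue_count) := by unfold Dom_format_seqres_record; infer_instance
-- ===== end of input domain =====

-- B maps the sequence to three-letter codes first and then slices off one 13-code window per
-- record (no in-loop flush, no trailing special case); same output as A, objective: simpler.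


-- shared by both ports: the amino-acid mapping dict (identical literal in Source A and Source B)
def aaMapping : PySem.Dict Char String := PySem.Dict.ofList
  [('A', "ALA"), ('R', "ARG"), ('N', "ASN"), ('D', "ASP"), ('C', "CYS"), ('E', "GLU"),
   ('Q', "GLN"), ('G', "GLY"), ('H', "HIS"), ('I', "ILE"), ('L', "LEU"), ('K', "LYS"),
   ('M', "MET"), ('F', "PHE"), ('P', "PRO"), ('S', "SER"), ('T', "THR"), ('W', "TRP"),
   ('Y', "TYR"), ('V', "VAL")]

-- one_to_three_letter_code / AA_MAPPING.get(c, 'XXX') (identical in both Pythons)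
def oneToThree (c : Char) : String := PySem.Dict.getD aaMapping c "XXX"

-- "{n:3d}" / "{n:-5d}": str(n) right-aligned in a field of w spaces ('-' sign option = default for d)
def padInt (w : Nat) (n : Int) : String :=
  String.ofList (List.replicate (w - (PySem.Int.toChars n).length) ' ' ++ PySem.Int.toChars n)

-- the seqres_template / SEQRES_TEMPLATE format call (identical literal in both Pythons)
def seqresLine (serial : Int) (chain_id : String) (residue_count : Int) (residues : List String) : String :=
  "SEQRES " ++ padInt 3 serial ++ " " ++ chain_id ++ " " ++ padInt 5 residue_count ++ " " ++
    PySem.Str.join " " residues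

-- ===== PORT A =====
-- state = (seqres_records, serial, residues); one step of A's for-loop over the sequence
def aStep (chain_id : String) (residue_count : Int)
    (st : List String × Int × List String) (residue : Char) : List String × Int × List String :=
  let code := oneToThree residue
  if st.2.2.length == 13 then
    (st.1 ++ [seqresLine st.2.1 chain_id residue_count st.2.2], st.2.1 + 1, [code])
  else
    (st.1, st.2.1, st.2.2 ++ [code])

def format_seqres_record (chain_id : String) (sequence : String) (residue_count : Int) : List String :=
  let st := sequence.toList.foldl (aStep chain_id residue_count) ([], 1, [])
  if st.2.2 = [] then st.1
  else st.1 ++ [seqresLine st.2.1 chain_id residue_count st.2.2]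

-- ===== PORT B =====
-- B's while-loop: emit one record per window codes[start:start+13], start advancing by 13
def bLoop (chain_id : String) (residue_count : Int) (serial : Int) (start : Int) (codes : List String) : List String :=
  if (codes.length : Int) ≤ start then []
  else
    seqresLine serial chain_id residue_count (PySem.List.slice codes (some start) (some (start + 13))) ::
      bLoop chain_id residue_count (serial + 1) (start + 13) codes
termination_by ((codes.length : Int) - start).toNat
decreasing_by omega

def format_seqres_record_alt (chain_id : String) (sequence : String) (residue_count : Int) : List String :=
  let codes := sequence.toList.map oneToThree
  bLoop chain_id residue_count 1 0 codes

-- ===== PRECONDITION & SPEC =====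
def Spec_format_seqres_record (chain_id : String) (sequence : String) (residue_count : Int) (out : List String) : Prop := out = format_seqres_record_alt chain_id sequence residue_count
instance (chain_id : String) (sequence : String) (residue_count : Int) (out : List String) : Decidable (Spec_format_seqres_record chain_id sequence residue_count out) := by unfold Spec_format_seqres_record; infer_instance

-- ===== CLAIM (what is proved, stated in full; the proofs are below) =====
def Claim_equal_format_seqres_record : Prop := ∀ (chain_id : String) (sequence : String) (residue_count : Int), Dom_format_seqres_record chain_id sequence residue_count → Spec_format_seqres_record chain_id sequence residue_count (format_seqres_record chain_id sequence residue_count)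

-- ===== LEMMAS AND PROOFS =====

-- A's loop step re-expressed on an already-translated code (aStep st c = stepC st (oneToThree c))
def stepC (chain_id : String) (residue_count : Int)
    (st : List String × Int × List String) (code : String) : List String × Int × List String :=
  if st.2.2.length == 13 then
    (st.1 ++ [seqresLine st.2.1 chain_id residue_count st.2.2], st.2.1 + 1, [code])
  else
    (st.1, st.2.1, st.2.2 ++ [code])

-- A's post-loop flush
def finishA (chain_id : String) (residue_count : Int)
    (st : List String × Int × List String) : List String :=
  if st.2.2 = [] then st.1
  else st.1 ++ [seqresLine st.2.1 chain_id residue_count st.2.2]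

theorem stepC_full (cid : String) (rc : Int) (st : List String × Int × List String)
    (code : String) (h : st.2.2.length = 13) :
    stepC cid rc st code = (st.1 ++ [seqresLine st.2.1 cid rc st.2.2], st.2.1 + 1, [code]) := by
  simp [stepC, h]

theorem stepC_small (cid : String) (rc : Int) (st : List String × Int × List String)
    (code : String) (h : st.2.2.length ≠ 13) :
    stepC cid rc st code = (st.1, st.2.1, st.2.2 ++ [code]) := by
  simp [stepC, h]

-- proof-side 13-wise chunker: the common shape both loops are reduced to
def chunkRec (cid : String) (rc : Int) (serial : Int) (codes : List String) : List String :=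
  if h : codes = [] then []
  else seqresLine serial cid rc (codes.take 13) :: chunkRec cid rc (serial + 1) (codes.drop 13)
termination_by codes.length
decreasing_by
  have : codes.length ≠ 0 := fun hn => h (List.eq_nil_of_length_eq_zero hn)
  simp only [List.length_drop]; omega

theorem chunkRec_nil (cid : String) (rc : Int) (s : Int) : chunkRec cid rc s [] = [] := by
  rw [chunkRec.eq_def]; simp

theorem chunkRec_cons (cid : String) (rc : Int) (s : Int) (codes : List String) (h : codes ≠ []) :
    chunkRec cid rc s codes =
      seqresLine s cid rc (codes.take 13) :: chunkRec cid rc (s + 1) (codes.drop 13) := by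
  rw [chunkRec.eq_def, dif_neg h]

-- B's index loop walks `codes` from `start` exactly as chunkRec walks codes.drop start
theorem bLoop_eq_chunkRec (cid : String) (rc : Int) :
    ∀ (n : Nat) (codes : List String) (start serial : Int), 0 ≤ start →
      (codes.length : Int) - start ≤ n →
      bLoop cid rc serial start codes = chunkRec cid rc serial (codes.drop start.toNat) := by
  intro n
  induction n with
  | zero =>
    intro codes start serial h0 hn
    rw [bLoop.eq_def, if_pos (by omega), List.drop_eq_nil_of_le (by omega), chunkRec_nil]
  | succ n ih =>
    intro codes start serial h0 hn
    by_cases hle : (codes.length : Int) ≤ start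
    · rw [bLoop.eq_def, if_pos hle, List.drop_eq_nil_of_le (by omega), chunkRec_nil]
    · rw [bLoop.eq_def, if_neg hle,
        PySem.List.slice_toNat codes h0 (by omega),
        show (start + 13).toNat - start.toNat = 13 from by omega,
        ih codes (start + 13) (serial + 1) (by omega) (by omega),
        show (start + 13).toNat = start.toNat + 13 from by omega,
        ← List.drop_drop,
        chunkRec_cons cid rc serial (codes.drop start.toNat)
          (by intro hnil; have := congrArg List.length hnil; simp at this; omega)]

-- invariant of A's fold: flushing at the end reproduces the 13-wise chunking of residues ++ codes
theorem aFold_eq_bLoop (cid : String) (rc : Int) :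
    ∀ (codes recs : List String) (serial : Int) (residues : List String),
      residues.length ≤ 13 →
      finishA cid rc (codes.foldl (stepC cid rc) (recs, serial, residues)) =
        recs ++ chunkRec cid rc serial (residues ++ codes) := by
  intro codes
  induction codes with
  | nil =>
    intro recs serial residues hle
    simp only [List.foldl_nil, List.append_nil]
    by_cases hr : residues = []
    · simp [finishA, hr, chunkRec_nil]
    · rw [finishA, if_neg hr, chunkRec_cons cid rc serial residues hr,
        List.take_of_length_le hle, List.drop_eq_nil_of_le hle, chunkRec_nil]
  | cons c rest ih =>
    intro recs serial residues hle
    rw [List.foldl_cons]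
    by_cases h13 : residues.length = 13
    · rw [stepC_full cid rc (recs, serial, residues) c h13,
        ih (recs ++ [seqresLine serial cid rc residues]) (serial + 1) [c] (by simp),
        chunkRec_cons cid rc serial (residues ++ c :: rest) (by simp),
        List.take_left' h13, List.drop_left' h13]
      simp
    · rw [stepC_small cid rc (recs, serial, residues) c h13,
        ih recs serial (residues ++ [c]) (by simp; omega)]
      simp

-- ===== VERDICT (by name: the statement is the Claim_ definition above) =====
theorem format_seqres_record_spec : Claim_equal_format_seqres_record := by
  intro cid seq rc _
  show format_seqres_record cid seq rc = format_seqres_record_alt cid seq rc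
  show finishA cid rc
      (seq.toList.foldl (fun st c => stepC cid rc st (oneToThree c)) ([], 1, [])) =
    bLoop cid rc 1 0 (seq.toList.map oneToThree)
  rw [← List.foldl_map,
    bLoop_eq_chunkRec cid rc (seq.toList.map oneToThree).length (seq.toList.map oneToThree) 0 1 le_rfl (by simp)]
  simpa using aFold_eq_bLoop cid rc (seq.toList.map oneToThree) [] 1 [] (by simp)
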